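-- pv_equiv track=rewrite | github.com/wonniiii/Algorithm | 프로그래머스/1/155652. 둘만의 암호/둘만의 암호.py | solution
-- ===== SOURCE A (Python) =====
-- def solution(s, skip, index):
--     answer = ''
--     aList =[chr(i) for i in range(97,123)]
--     skip = list(skip)
--
--     new_list = [x for x in aList if (x not in skip)]
--     new_list_len = len(new_list)
--
--     for char in s:
--         if char in new_list:
--             current_index = new_list.index(char)
--             new_index = (current_index + index) % new_list_len
--             answer += new_list[new_index]
--         else:
--             answer += char
--
--     return answer
-- ===== SOURCE B (Python) =====
-- def solution(s, skip, index):
--     n = sum(c not in skip for c in 'abcdefghijklmnopqrstuvwxyz')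
--     k = index % n if n else 0
--
--     def step(d):
--         d = chr(97 + (ord(d) - 97 + 1) % 26)
--         while d in skip:
--             d = chr(97 + (ord(d) - 97 + 1) % 26)
--         return d
--
--     def shift(c):
--         if 'a' <= c <= 'z' and c not in skip:
--             for _ in range(k):
--                 c = step(c)
--         return c
--
--     return ''.join(map(shift, s))
-- ===== Notes on version B (the rewrite author's own statement) =====
-- stated objective: alternative
-- what changed: B never builds the reduced alphabet or looks up ranks: it decodes each letter by iterating a cyclic-successor walk over the raw 26-letter alphabet (advance one letter, keep advancing while the letter is forbidden) index-mod-n times, where n is the count of allowed letters; A instead finds the letter's rank in the filtered list and indexes it at (rank+index) mod n.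
import Mathlib
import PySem

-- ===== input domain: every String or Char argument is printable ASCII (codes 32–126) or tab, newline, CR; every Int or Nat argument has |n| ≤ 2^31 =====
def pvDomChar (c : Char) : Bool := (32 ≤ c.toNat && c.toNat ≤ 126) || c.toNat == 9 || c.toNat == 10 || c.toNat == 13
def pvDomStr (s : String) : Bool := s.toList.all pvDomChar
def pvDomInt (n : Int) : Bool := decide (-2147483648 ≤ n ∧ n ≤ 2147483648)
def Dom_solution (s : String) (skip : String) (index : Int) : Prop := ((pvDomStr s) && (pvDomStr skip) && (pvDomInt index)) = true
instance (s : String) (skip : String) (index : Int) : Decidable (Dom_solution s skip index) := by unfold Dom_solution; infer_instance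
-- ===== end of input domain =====

-- B decodes each letter by iterating a cyclic-successor walk over the raw alphabet (skipping forbidden letters) index-mod-n times, instead of A's rank lookup + modular arithmetic in the reduced list; objective: alternative.

-- ===== PORT A =====
def solution (s : String) (skip : String) (index : Int) : String :=
  let aList : List Char := (PySem.List.pyRange 97 123 1).map (fun i => Char.ofNat i.toNat)
  let skipL : List Char := skip.toList
  let newList : List Char := aList.filter (fun x => !(skipL.contains x))
  let n : Int := PySem.List.len newList
  String.ofList (s.toList.foldl (fun acc char =>
    if newList.contains char then
      -- char ∈ newList, so new_list.index(char) succeeds; .getD 0 is unreachable default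
      let ci : Nat := (PySem.List.index? newList char).getD 0
      let ni : Int := PySem.Int.mod ((ci : Int) + index) n
      acc ++ [PySem.List.pyGetD newList ni ' ']
    else acc ++ [char]) [])

-- ===== PORT B =====
-- step(d) of Source B: advance one alphabet letter cyclically, then keep advancing while forbidden.
-- Fuel 26 is exact: step is only invoked from an allowed lowercase letter, whose 26th cyclic
-- successor is itself, so the while-loop of Source B always stops within 26 advances.
def pvSuccChar (d : Char) : Char := Char.ofNat (97 + (d.toNat - 97 + 1) % 26)

def pvStepGo (skipL : List Char) : Nat → Char → Char
  | 0, d => d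
  | f+1, d => if skipL.contains d then pvStepGo skipL f (pvSuccChar d) else d

def pvStep (skipL : List Char) (d : Char) : Char := pvStepGo skipL 26 (pvSuccChar d)

def solution_alt (s : String) (skip : String) (index : Int) : String :=
  let skipL : List Char := skip.toList
  let n : Int := ("abcdefghijklmnopqrstuvwxyz".toList.map
    (fun c => if !skipL.contains c then (1:Int) else 0)).sum
  let k : Int := if n ≠ 0 then PySem.Int.mod index n else 0
  String.ofList (s.toList.map (fun c =>
    if 'a' ≤ c ∧ c ≤ 'z' ∧ skipL.contains c = false then (pvStep skipL)^[k.toNat] c else c))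

-- ===== PRECONDITION & SPEC =====
def Spec_solution (s : String) (skip : String) (index : Int) (out : String) : Prop := out = solution_alt s skip index
instance (s : String) (skip : String) (index : Int) (out : String) : Decidable (Spec_solution s skip index out) := by unfold Spec_solution; infer_instance

-- ===== CLAIM (what is proved, stated in full; the proofs are below) =====
def Claim_equal_solution : Prop := ∀ (s : String) (skip : String) (index : Int), Dom_solution s skip index → Spec_solution s skip index (solution s skip index)

-- ===== LEMMAS AND PROOFS =====

-- the 26-letter alphabet, as an explicit list, used only by the proofs
def pvAlpha : List Char := ['a','b','c','d','e','f','g','h','i','j','k','l','m','n','o','p','q','r','s','t','u','v','w','x','y','z']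

lemma alphaA_eq : (PySem.List.pyRange 97 123 1).map (fun i => Char.ofNat i.toNat) = pvAlpha := by decide

lemma alphaB_eq : "abcdefghijklmnopqrstuvwxyz".toList = pvAlpha := by decide

lemma alpha_nodup : pvAlpha.Nodup := by decide

lemma mem_alpha (c : Char) : c ∈ pvAlpha ↔ ('a' ≤ c ∧ c ≤ 'z') := by
  constructor
  · intro h; fin_cases h <;> exact ⟨by decide, by decide⟩
  · rintro ⟨h1, h2⟩
    rw [Char.le_def, UInt32.le_iff_toNat_le] at h1 h2
    have h1' : 97 ≤ c.toNat := h1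
    have h2' : c.toNat ≤ 122 := h2
    have hmap : pvAlpha = (List.range' 97 26).map Char.ofNat := by decide
    rw [hmap, List.mem_map]
    refine ⟨c.toNat, ?_, Char.ofNat_toNat c⟩
    rw [List.mem_range']
    exact ⟨c.toNat - 97, by omega, by omega⟩

-- the chain of cyclic successors of d, of length f
def pvChain : Char → Nat → List Char
  | _, 0 => []
  | d, f+1 => d :: pvChain (pvSuccChar d) f

-- the while-loop of step returns the first allowed letter of the successor chain
lemma stepGo_eq_headI (skipL : List Char) (f : Nat) (d : Char)
    (h : (pvChain d f).filter (fun c => !skipL.contains c) ≠ []) :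
    pvStepGo skipL f d = ((pvChain d f).filter (fun c => !skipL.contains c)).headI := by
  induction f generalizing d with
  | zero => simp [pvChain] at h
  | succ f ih =>
    rw [pvChain, List.filter_cons] at h ⊢
    by_cases hc : skipL.contains d
    · have hnot : ¬ ((!skipL.contains d) = true) := by rw [hc]; decide
      rw [if_neg hnot] at h ⊢
      rw [pvStepGo, if_pos hc]
      exact ih _ h
    · have hyes : ((!skipL.contains d) = true) := by
        rw [Bool.not_eq_true] at hc; rw [hc]; decide
      rw [if_pos hyes, pvStepGo, if_neg hc]
      rfl

-- the 26-chain from the successor of alphabet letter j is the alphabet rotated past j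
lemma chain_rot (j : Fin 26) :
    pvChain (pvSuccChar (pvAlpha.get j)) 26 = pvAlpha.drop (j.1+1) ++ pvAlpha.take (j.1+1) := by
  fin_cases j <;> decide

-- one step from the i-th allowed letter lands on the (i+1 mod n)-th allowed letter
lemma step_getD (skipL : List Char) (i : Nat)
    (hi : i < (pvAlpha.filter (fun c => !skipL.contains c)).length) :
    pvStep skipL ((pvAlpha.filter (fun c => !skipL.contains c)).getD i ' ')
      = (pvAlpha.filter (fun c => !skipL.contains c)).getD
          ((i+1) % (pvAlpha.filter (fun c => !skipL.contains c)).length) ' ' := by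
  set p : Char → Bool := fun c => !skipL.contains c with hp
  set L : List Char := pvAlpha.filter p with hL
  have hgetc : L.getD i ' ' = L[i] := List.getD_eq_getElem L ' ' hi
  set c : Char := L[i] with hc
  have hcmem : c ∈ L := List.getElem_mem hi
  have hca : c ∈ pvAlpha := List.mem_of_mem_filter hcmem
  have hpc : p c = true := List.of_mem_filter hcmem
  obtain ⟨j, hj, hcj⟩ := List.getElem_of_mem hca
  have hj26 : j < 26 := by simpa [pvAlpha] using hj
  -- decompose the alphabet around position j
  have htake : pvAlpha.take (j+1) = pvAlpha.take j ++ [c] := by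
    rw [List.take_add_one, List.getElem?_eq_getElem hj, hcj]; rfl
  set F1 : List Char := (pvAlpha.take j).filter p with hF1
  set F2 : List Char := (pvAlpha.drop (j+1)).filter p with hF2
  have hLdec : L = F1 ++ [c] ++ F2 := by
    conv_lhs => rw [hL, ← List.take_append_drop (j+1) pvAlpha]
    rw [List.filter_append, htake, List.filter_append]
    simp only [List.filter_singleton, hpc, cond_true]
    rw [← hF1, ← hF2]
  -- i is forced to be F1.length, because L has no duplicates
  have hnd : L.Nodup := List.Nodup.filter p alpha_nodup
  have hF1lt : F1.length < L.length := by
    rw [hLdec, List.length_append, List.length_append, List.length_singleton]; omega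
  have hgetF1 : L[F1.length]'hF1lt = c := by
    have h? : L[F1.length]? = some c := by
      rw [hLdec, List.getElem?_append_left (by simp),
          List.getElem?_append_right (le_refl _)]
      simp
    rw [List.getElem?_eq_getElem hF1lt] at h?
    exact Option.some.inj h?
  have hiF1 : i = F1.length := by
    exact (List.Nodup.getElem_inj_iff hnd).mp (by rw [hgetF1, ← hc])
  -- step c = first allowed letter of the rotated alphabet chain
  have hchain : pvChain (pvSuccChar c) 26 = pvAlpha.drop (j+1) ++ pvAlpha.take (j+1) := by
    have := chain_rot ⟨j, hj26⟩
    simpa [List.get_eq_getElem, hcj] using this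
  have hfil : (pvChain (pvSuccChar c) 26).filter p = F2 ++ (F1 ++ [c]) := by
    rw [hchain, List.filter_append, htake, List.filter_append]
    simp only [List.filter_singleton, hpc, cond_true]
    rw [← hF1, ← hF2]
  have hne : (pvChain (pvSuccChar c) 26).filter p ≠ [] := by
    rw [hfil]; simp
  have hstep : pvStep skipL c = ((pvChain (pvSuccChar c) 26).filter p).headI :=
    stepGo_eq_headI skipL 26 (pvSuccChar c) hne
  rw [hgetc, hstep, hfil]
  -- compare with L[(i+1) % L.length]
  cases hF2e : F2 with
  | nil =>
    -- c is the last allowed letter: wrap to the head of L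
    have hlen : L.length = i + 1 := by
      rw [hLdec, hF2e, hiF1, List.length_append, List.length_append,
          List.length_singleton, List.length_nil]
    have hmod : (i+1) % L.length = 0 := by rw [hlen]; simp
    rw [hmod, hLdec, hF2e]
    simp only [List.nil_append, List.append_nil]
    cases hF1e : F1 with
    | nil => simp
    | cons a t => simp
  | cons d F2' =>
    -- the next allowed letter is the head of F2
    have hlen : L.length = i + 1 + (F2'.length + 1) := by
      rw [hLdec, hF2e, hiF1, List.length_append, List.length_append,
          List.length_singleton, List.length_cons]
    have hmod : (i+1) % L.length = i + 1 := Nat.mod_eq_of_lt (by omega)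
    have hlt : i + 1 < L.length := by omega
    rw [hmod, List.getD_eq_getElem?_getD, hLdec, hF2e,
        List.getElem?_append_right (by simp [hiF1])]
    simp [hiF1]

-- iterating step k times from the i-th allowed letter lands on the (i+k mod n)-th
lemma iterate_step_getD (skipL : List Char) (k : Nat) : ∀ (i : Nat),
    i < (pvAlpha.filter (fun c => !skipL.contains c)).length →
    (pvStep skipL)^[k] ((pvAlpha.filter (fun c => !skipL.contains c)).getD i ' ')
      = (pvAlpha.filter (fun c => !skipL.contains c)).getD
          ((i+k) % (pvAlpha.filter (fun c => !skipL.contains c)).length) ' ' := by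
  induction k with
  | zero => intro i hi; rw [Function.iterate_zero_apply, Nat.add_zero, Nat.mod_eq_of_lt hi]
  | succ k ih =>
    intro i hi
    rw [Function.iterate_succ_apply, step_getD skipL i hi,
        ih _ (Nat.mod_lt _ (by omega)), Nat.mod_add_mod,
        show i + 1 + k = i + (k+1) from by omega]

-- A's append-in-branches loop is a map
lemma foldl_if_append_eq_map (P : Char → Bool) (f : Char → Char) (xs : List Char) :
    xs.foldl (fun acc c => if P c then acc ++ [f c] else acc ++ [c]) []
      = xs.map (fun c => if P c then f c else c) := by
  have h : (fun (acc : List Char) c => if P c then acc ++ [f c] else acc ++ [c])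
      = fun acc c => acc ++ [if P c then f c else c] := by
    funext acc c; by_cases hp : P c <;> simp [hp]
  rw [h, PySem.List.foldl_append_singleton_eq_map]
  simp

-- per-character agreement of the two ports
lemma char_eq (skipL : List Char) (index : Int) (c : Char) :
    (let newList := pvAlpha.filter (fun x => !(skipL.contains x))
     if newList.contains c then
       PySem.List.pyGetD newList
         (PySem.Int.mod ((((PySem.List.index? newList c).getD 0 : Nat) : Int) + index)
           (PySem.List.len newList)) ' '
     else c)
    = (let n : Int := (pvAlpha.map (fun x => if !skipL.contains x then (1:Int) else 0)).sum
       let k : Int := if n ≠ 0 then PySem.Int.mod index n else 0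
       if 'a' ≤ c ∧ c ≤ 'z' ∧ skipL.contains c = false then (pvStep skipL)^[k.toNat] c else c) := by
  set L : List Char := pvAlpha.filter (fun x => !skipL.contains x) with hL
  have hsum : (pvAlpha.map (fun x => if !skipL.contains x then (1:Int) else 0)).sum
      = (L.length : Int) :=
    (PySem.List.sum_map_ite_one_zero (fun x => !skipL.contains x) pvAlpha).trans
      (by exact_mod_cast (List.countP_eq_length_filter (l := pvAlpha)
            (p := fun x => !skipL.contains x)))
  simp only [hsum]
  by_cases hc : c ∈ L
  · -- both take the shifting branch
    have hcont : L.contains c = true := by simpa using hc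
    have hnpos : 0 < L.length := List.length_pos_of_mem hc
    have hBcond : 'a' ≤ c ∧ c ≤ 'z' ∧ skipL.contains c = false := by
      have hca : c ∈ pvAlpha := List.mem_of_mem_filter hc
      have hpc : (!skipL.contains c) = true := (List.mem_filter.mp hc).2
      obtain ⟨h1, h2⟩ := (mem_alpha c).mp hca
      exact ⟨h1, h2, by simpa using hpc⟩
    obtain ⟨idx, hidx⟩ := Option.isSome_iff_exists.mp
      ((PySem.List.index?_isSome_iff L c).mpr hc)
    obtain ⟨hidxlt, hgetidx, -⟩ := PySem.List.getElem_of_index?_eq_some hidx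
    have hnne : (L.length : Int) ≠ 0 := by exact_mod_cast Nat.pos_iff_ne_zero.mp hnpos
    have hnposI : (0:Int) < (L.length : Int) := by exact_mod_cast hnpos
    rw [if_pos hcont, if_pos hBcond, hidx, if_pos hnne]
    simp only [Option.getD_some]
    -- Python % with a positive divisor is emod
    rw [PySem.List.len_eq, PySem.Int.mod_eq_emod_of_pos hnposI,
        PySem.Int.mod_eq_emod_of_pos hnposI]
    -- left side: pyGetD at an in-range index
    have h0 : 0 ≤ ((idx:Int) + index) % (L.length:Int) := Int.emod_nonneg _ hnne
    have h1 : ((idx:Int) + index) % (L.length:Int) < (L.length:Int) :=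
      Int.emod_lt_of_pos _ hnposI
    rw [PySem.List.pyGetD_eq_getElem _ _ h0 h1]
    -- right side: iterate lemma from position idx
    have hcd : c = L.getD idx ' ' := by rw [List.getD_eq_getElem L ' ' hidxlt, hgetidx]
    rw [hcd, iterate_step_getD skipL _ idx hidxlt]
    rw [List.getD_eq_getElem L ' ' (Nat.mod_lt _ hnpos)]
    -- index arithmetic: ((idx + index) % n).toNat = (idx + (index % n).toNat) % n
    congr 1
    have he0 : 0 ≤ index % (L.length : Int) := Int.emod_nonneg index hnne
    have hsplit : ((idx:Int) + index) % (L.length : Int)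
        = ((idx:Int) + index % (L.length : Int)) % (L.length : Int) := by
      rw [Int.add_emod (idx:Int) index, Int.add_emod (idx:Int) (index % (L.length:Int)),
          Int.emod_emod_of_dvd index dvd_rfl]
    rw [hsplit]
    have hcast : (idx:Int) + index % (L.length : Int)
        = ((idx + (index % (L.length : Int)).toNat : Nat) : Int) := by
      push_cast [Int.toNat_of_nonneg he0]; ring
    rw [hcast, ← Int.natCast_mod, Int.toNat_natCast]
  · -- both leave c unchanged
    have hcont : L.contains c = false := by simpa using hc
    rw [if_neg (show ¬ (L.contains c = true) by rw [hcont]; decide), if_neg ?_]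
    rintro ⟨h1, h2, h3⟩
    refine hc (List.mem_filter.mpr ⟨(mem_alpha c).mpr ⟨h1, h2⟩, ?_⟩)
    show (!skipL.contains c) = true
    rw [h3]; decide

-- ===== VERDICT (by name: the statement is the Claim_ definition above) =====
theorem solution_spec : Claim_equal_solution := by
  intro s skip index _
  unfold Spec_solution solution solution_alt
  simp only [alphaA_eq, alphaB_eq]
  congr 1
  rw [foldl_if_append_eq_map]
  congr 1
  funext c
  exact char_eq skip.toList index c
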